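-- pv_equiv track=rewrite | github.com/Marfung37/AveragePC | avgPercent.py | removeChars
-- ===== SOURCE A (Python) =====
-- def removeChars(queue, build):
--     build = list(build)
--     queue = list(queue)
--     for p in reversed(queue):
--         if p in build:
--             build.remove(p)
--             queue.remove(p)
--     return "".join(queue)
-- ===== SOURCE B (Python) =====
-- def removeChars(queue, build):
--     cnt = {}
--     for c in build:
--         cnt[c] = cnt.get(c, 0) + 1
--     out = []
--     for c in queue:
--         if cnt.get(c, 0) > 0:
--             cnt[c] = cnt[c] - 1
--         else:
--             out.append(c)
--     return "".join(out)
-- ===== Notes on version B (the rewrite author's own statement) =====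
-- stated objective: faster
-- what changed: Replaced the reversed-iteration loop that repeatedly scans and mutates both lists (p in build / list.remove) with a character-count dictionary built once over build followed by a single forward pass over queue that skips the first count occurrences of each character.
import Mathlib
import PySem

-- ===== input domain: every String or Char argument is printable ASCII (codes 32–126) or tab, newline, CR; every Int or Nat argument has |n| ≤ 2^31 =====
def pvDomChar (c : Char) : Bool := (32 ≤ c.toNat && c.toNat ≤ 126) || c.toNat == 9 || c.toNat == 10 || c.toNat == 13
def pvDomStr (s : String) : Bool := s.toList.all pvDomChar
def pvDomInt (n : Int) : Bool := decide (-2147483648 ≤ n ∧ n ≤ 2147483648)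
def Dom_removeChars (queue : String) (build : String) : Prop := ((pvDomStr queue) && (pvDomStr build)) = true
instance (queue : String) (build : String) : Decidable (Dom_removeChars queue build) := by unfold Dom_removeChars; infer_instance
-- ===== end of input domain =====

-- B replaces A's reversed-iteration cancel loop (repeated `in`/`remove` scans, O(n^2)) by a
-- count dictionary over build and one forward pass over queue (O(n)); same return value everywhere.

-- ===== PORT A =====
-- CPython's reversed(list) iterator holds an index starting at len-1 and, at each step, yields
-- the element at that index of the CURRENT list if the index is in range (else it stops), then
-- decrements.  Since every queue.remove shrinks the list by exactly 1 in the same step as the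
-- index decrement, the index stays in range; fuel n below is index+1.
-- list.remove(p) after a successful `p in` test is exactly List.erase (first occurrence).
def removeCharsLoop : Nat → List Char → List Char → List Char
  | 0, queue, _ => queue
  | n + 1, queue, build =>
    if n < queue.length then
      let p := queue.getD n ' '
      if p ∈ build then removeCharsLoop n (queue.erase p) (build.erase p)
      else removeCharsLoop n queue build
    else queue

def removeChars (queue : String) (build : String) : String :=
  String.mk (removeCharsLoop queue.toList.length queue.toList build.toList)

-- ===== PORT B =====
-- cnt = {}; for c in build: cnt[c] = cnt.get(c, 0) + 1
-- out = []; for c in queue: if cnt.get(c,0) > 0: cnt[c] -= 1 else: out.append(c)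
def removeChars_alt (queue : String) (build : String) : String :=
  let cnt0 : PySem.Dict Char Int :=
    build.toList.foldl (fun d c => d.insert c (d.getD c 0 + 1)) PySem.Dict.empty
  let res :=
    queue.toList.foldl
      (fun (st : PySem.Dict Char Int × List Char) c =>
        if st.1.getD c 0 > 0 then (st.1.insert c (st.1.getD c 0 - 1), st.2)
        else (st.1, st.2 ++ [c]))
      (cnt0, [])
  String.mk res.2

-- ===== PRECONDITION & SPEC =====
def Spec_removeChars (queue : String) (build : String) (out : String) : Prop := out = removeChars_alt queue build
instance (queue : String) (build : String) (out : String) : Decidable (Spec_removeChars queue build out) := by unfold Spec_removeChars; infer_instance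

-- ===== CLAIM (what is proved, stated in full; the proofs are below) =====
def Claim_equal_removeChars : Prop := ∀ (queue : String) (build : String), Dom_removeChars queue build → Spec_removeChars queue build (removeChars queue build)

-- ===== LEMMAS AND PROOFS =====

-- Common reference: forward pass keeping build as a residual list.
def gSpec : List Char → List Char → List Char
  | [], _ => []
  | c :: q, b => if c ∈ b then gSpec q (b.erase c) else c :: gSpec q b

-- what is left of the budget b after gSpec consumed q
def resid : List Char → List Char → List Char
  | [], b => b
  | c :: q, b => if c ∈ b then resid q (b.erase c) else resid q b

lemma mem_of_mem_resid {x : Char} : ∀ (q b : List Char), x ∈ resid q b → x ∈ b := by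
  intro q
  induction q with
  | nil => intro b h; exact h
  | cons c q ih =>
    intro b h
    simp only [resid] at h
    split at h
    · exact List.erase_subset (ih _ h)
    · exact ih _ h

lemma gSpec_concat : ∀ (q b : List Char) (p : Char),
    gSpec (q ++ [p]) b = if p ∈ resid q b then gSpec q b else gSpec q b ++ [p] := by
  intro q
  induction q with
  | nil =>
    intro b p
    simp only [List.nil_append, gSpec, resid]
  | cons c q ih =>
    intro b p
    simp only [List.cons_append, gSpec, resid]
    by_cases hc : c ∈ b
    · simp [hc, ih]
    · simp only [hc, if_false, ih]
      split <;> simp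

lemma gSpec_erase {p : Char} : ∀ (q b : List Char), p ∈ q → p ∈ b →
    gSpec q b = gSpec (q.erase p) (b.erase p) := by
  intro q
  induction q with
  | nil => intro b h; cases h
  | cons c q ih =>
    intro b hq hb
    by_cases hc : c = p
    · subst hc
      simp [gSpec, hb, List.erase_cons_head]
    · have hpq : p ∈ q := by
        rcases List.mem_cons.mp hq with h | h
        · exact absurd h.symm hc
        · exact h
      have hec : (c :: q).erase p = c :: q.erase p :=
        List.erase_cons_tail (by simp [hc])
      rw [hec]
      simp only [gSpec]
      have hmem : c ∈ b.erase p ↔ c ∈ b := List.mem_erase_of_ne hc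
      by_cases hcb : c ∈ b
      · rw [if_pos hcb, if_pos (hmem.mpr hcb)]
        rw [ih _ hpq ((List.mem_erase_of_ne (Ne.symm hc)).mpr hb)]
        rw [List.erase_comm]
      · rw [if_neg hcb, if_neg (fun h => hcb (hmem.mp h))]
        rw [ih _ hpq hb]

lemma loopA_eq : ∀ (n : Nat) (q₁ q₂ b : List Char), q₁.length = n →
    removeCharsLoop n (q₁ ++ q₂) b = gSpec q₁ b ++ q₂ := by
  intro n
  induction n with
  | zero =>
    intro q₁ q₂ b h
    rw [List.length_eq_zero_iff.mp h]
    simp [removeCharsLoop, gSpec]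
  | succ n ih =>
    intro q₁ q₂ b h
    rcases List.eq_nil_or_concat q₁ with rfl | ⟨qs, p, rfl⟩
    all_goals simp only [List.concat_eq_append] at *
    · simp at h
    · have hqs : qs.length = n := by
        simpa using h
      have hlt : n < (qs ++ [p] ++ q₂).length := by
        simp [hqs]
      have hget : ((qs ++ [p]) ++ q₂).getD n ' ' = p := by
        rw [List.append_assoc]
        rw [List.getD_eq_getElem?_getD, List.getElem?_append_right (by omega)]
        simp [hqs]
      simp only [removeCharsLoop, if_pos hlt, hget]
      by_cases hb : p ∈ b
      · rw [if_pos hb]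
        have hpq : p ∈ qs ++ [p] := by simp
        have herase : ((qs ++ [p]) ++ q₂).erase p = (qs ++ [p]).erase p ++ q₂ :=
          List.erase_append_left _ hpq
        rw [herase, ih _ _ _ (by
          have := List.length_erase_of_mem hpq
          simp at this ⊢
          omega)]
        rw [← gSpec_erase _ _ hpq hb]
      · rw [if_neg hb]
        rw [List.append_assoc, ih qs ([p] ++ q₂) b hqs]
        have : gSpec (qs ++ [p]) b = gSpec qs b ++ [p] := by
          rw [gSpec_concat]
          rw [if_neg (fun h => hb (mem_of_mem_resid _ _ h))]
        rw [this, List.append_assoc]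

-- B-side: the counting loop with invariant "dict value = count in the residual budget list"
lemma loopB_eq : ∀ (q b out : List Char) (d : PySem.Dict Char Int),
    (∀ c, d.getD c 0 = (b.count c : Int)) →
    (q.foldl
      (fun (st : PySem.Dict Char Int × List Char) c =>
        if st.1.getD c 0 > 0 then (st.1.insert c (st.1.getD c 0 - 1), st.2)
        else (st.1, st.2 ++ [c]))
      (d, out)).2 = out ++ gSpec q b := by
  intro q
  induction q with
  | nil => intro b out d _; simp [gSpec]
  | cons c q ih =>
    intro b out d hinv
    simp only [List.foldl_cons, gSpec]
    by_cases hmem : c ∈ b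
    · have hcount : 0 < b.count c := List.count_pos_iff.mpr hmem
      have hpos : d.getD c 0 > 0 := by rw [hinv c]; exact_mod_cast hcount
      rw [if_pos hpos, if_pos hmem]
      apply ih
      intro c'
      rw [PySem.Dict.getD_insert]
      by_cases hc' : c' = c
      · subst hc'
        rw [if_pos rfl, hinv c', List.count_erase_self]
        have : (b.count c' : Int) - 1 = ((b.count c' - 1 : Nat) : Int) := by
          omega
        simpa using this
      · rw [if_neg hc', hinv c', List.count_erase_of_ne hc']
    · have hcount : b.count c = 0 := List.count_eq_zero.mpr hmem
      have hnpos : ¬ d.getD c 0 > 0 := by rw [hinv c, hcount]; omega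
      rw [if_neg hnpos, if_neg hmem]
      rw [ih _ _ _ hinv, List.append_assoc]
      simp

-- ===== VERDICT (by name: the statement is the Claim_ definition above) =====
theorem removeChars_spec : Claim_equal_removeChars := by
  intro queue build _
  unfold Spec_removeChars removeChars removeChars_alt
  have hA : removeCharsLoop queue.toList.length (queue.toList ++ []) build.toList
      = gSpec queue.toList build.toList ++ [] := loopA_eq _ _ _ _ rfl
  have hinv : ∀ c, (build.toList.foldl (fun d c => d.insert c (d.getD c 0 + 1))
      PySem.Dict.empty).getD c 0 = (build.toList.count c : Int) := by
    intro c
    rw [PySem.Dict.getD_foldl_insert_add_one]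
    simp [PySem.Dict.getD_empty]
  have hB := loopB_eq queue.toList build.toList [] _ hinv
  simp only [List.append_nil] at hA
  simp only [List.nil_append] at hB
  rw [hA]
  exact congrArg String.mk hB.symm
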